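-- pv_equiv track=rewrite | github.com/pardio1/tag-analysis-generator | src/tag.py | print_double_sorted_list
-- ===== SOURCE A (Python) =====
-- def print_double_sorted_list(in_dict: dict) -> str:
--     """Print lists of values."""
--     # Header is used as the name of the entire in_dict.
--     # in_dict is a map of key-value.
--
--     out_str = ""
--     # These double sorts allow us to:
--     # 1: sort descending by count of each tag
--     # 2: within groups of tags of the same count, sort alphabetically ascending by tag
--     srt = sorted(in_dict.items(), key=lambda kv: (kv[0]), reverse=False)
--     srt = sorted(srt, key=lambda kv: (kv[1]), reverse=True)
--     for tag_count in srt: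
--         out_str += f"{str(tag_count[1])} {str(tag_count[0])}\n"
--     out_str += "\n"
--     return out_str
-- ===== SOURCE B (Python) =====
-- def print_double_sorted_list(in_dict: dict) -> str:
--     """Print lists of values."""
--     # Group tags by their count, then emit counts descending, tags ascending
--     # within each count group.
--     groups = {}
--     for tag, count in in_dict.items():
--         groups.setdefault(count, []).append(tag)
--     out_str = ""
--     for count in sorted(groups, reverse=True):
--         for tag in sorted(groups[count]):
--             out_str += f"{count} {tag}\n"
--     out_str += "\n"
--     return out_str
-- ===== Notes on version B (the rewrite author's own statement) =====
-- stated objective: alternative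
-- what changed: Replaces A's two stable full sorts of the items with a count-indexed grouping dict built in one pass, then a nested emit over counts sorted descending and each group's tags sorted ascending.
import Mathlib
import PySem

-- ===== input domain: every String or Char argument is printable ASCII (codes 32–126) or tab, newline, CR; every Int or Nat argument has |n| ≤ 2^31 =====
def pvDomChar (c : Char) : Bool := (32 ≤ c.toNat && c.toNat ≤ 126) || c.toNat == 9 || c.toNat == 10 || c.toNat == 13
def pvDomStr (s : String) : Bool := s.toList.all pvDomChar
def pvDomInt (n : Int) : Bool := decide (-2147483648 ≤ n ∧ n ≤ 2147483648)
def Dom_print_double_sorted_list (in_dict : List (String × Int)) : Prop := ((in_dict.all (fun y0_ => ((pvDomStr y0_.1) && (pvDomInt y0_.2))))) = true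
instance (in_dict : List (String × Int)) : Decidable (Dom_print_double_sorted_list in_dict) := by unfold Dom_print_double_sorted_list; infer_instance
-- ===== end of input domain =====

-- B replaces A's two stable full sorts with a count-indexed grouping dict and a
-- nested emit (counts descending, tags ascending within a count); same output.

-- ===== PORT A =====
-- A sorts the dict items ascending by tag, then (stably) descending by count,
-- and concatenates one "<count> <tag>\n" line per item, plus a final "\n".
def print_double_sorted_list (in_dict : List (String × Int)) : String :=
  let out_str : String := ""
  let srt := PySem.List.sorted (PySem.Dict.ofList in_dict).items (fun kv => kv.1) false
  let srt2 := PySem.List.sorted srt (fun kv => kv.2) true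
  let out_str := srt2.foldl
    (fun s tag_count => s ++ (PySem.Int.toStr tag_count.2 ++ " " ++ tag_count.1 ++ "\n")) out_str
  out_str ++ "\n"

-- ===== PORT B =====
-- groups.setdefault(count, []).append(tag) is d[count] = d.get(count, []) + [tag],
-- i.e. Dict.modify count [] (· ++ [tag]).
def print_double_sorted_list_alt (in_dict : List (String × Int)) : String :=
  let groups := (PySem.Dict.ofList in_dict).items.foldl
    (fun g p => g.modify p.2 [] (fun ts => ts ++ [p.1])) PySem.Dict.empty
  let out_str := (PySem.List.sorted groups.keys (fun c => c) true).foldl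
    (fun s c =>
      (PySem.List.sorted (groups.getD c []) (fun t => t) false).foldl
        (fun s tag => s ++ (PySem.Int.toStr c ++ " " ++ tag ++ "\n")) s) ""
  out_str ++ "\n"

-- ===== PRECONDITION & SPEC =====
def Spec_print_double_sorted_list (in_dict : List (String × Int)) (out : String) : Prop := out = print_double_sorted_list_alt in_dict
instance (in_dict : List (String × Int)) (out : String) : Decidable (Spec_print_double_sorted_list in_dict out) := by unfold Spec_print_double_sorted_list; infer_instance

-- ===== CLAIM (what is proved, stated in full; the proofs are below) =====
def Claim_equal_print_double_sorted_list : Prop := ∀ (in_dict : List (String × Int)), Dom_print_double_sorted_list in_dict → Spec_print_double_sorted_list in_dict (print_double_sorted_list in_dict)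

-- ===== LEMMAS AND PROOFS =====

theorem pvInsertBy_append_not {α : Type} (before : α → α → Bool) (x : α)
    (pre rest : List α) (h : ∀ y ∈ pre, before x y = false) :
    PySem.List.insertBy before x (pre ++ rest) = pre ++ PySem.List.insertBy before x rest := by
  induction pre with
  | nil => simp
  | cons y ys ih =>
      have hy : before x y = false := h y (by simp)
      simp [PySem.List.insertBy, hy]
      exact ih (fun z hz => h z (by simp [hz]))

theorem pvInsertBy_all {α : Type} (before : α → α → Bool) (x : α)
    (ys : List α) (h : ∀ y ∈ ys, before x y = true) :
    PySem.List.insertBy before x ys = x :: ys := by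
  cases ys with
  | nil => simp [PySem.List.insertBy]
  | cons y ys => simp [PySem.List.insertBy, h y (by simp)]

theorem pvInsertBy_grouped (k : String × Int → Int) (x : String × Int) :
    ∀ (C : List Int) (g : Int → List (String × Int)),
      C.Pairwise (· > ·) →
      (∀ c ∈ C, ∀ y ∈ g c, k y = c) →
      (k x ∉ C → g (k x) = []) →
      PySem.List.insertBy (fun a b => decide (k b < k a)) x (C.flatMap g) =
        (if k x ∈ C then C
         else PySem.List.insertBy (fun a b => decide (b < a)) (k x) C).flatMap
          (fun c => if c = k x then g c ++ [x] else g c)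
  | [], g, _, _, hfresh => by
      simp [PySem.List.insertBy, hfresh (by simp)]
  | c :: C, g, hC, hg, hfresh => by
      have hCh : ∀ c' ∈ C, c' < c := fun c' hc' => (List.pairwise_cons.mp hC).1 c' hc'
      have hCt : C.Pairwise (· > ·) := (List.pairwise_cons.mp hC).2
      rcases lt_trichotomy (k x) c with hlt | heq | hgt
      · -- k x < c : skip the whole first group
        have hne : k x ≠ c := ne_of_lt hlt
        have hskip : ∀ y ∈ g c, (fun a b => decide (k b < k a)) x y = false := by
          intro y hy
          have := hg c (by simp) y hy
          simp [this]; omega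
        rw [List.flatMap_cons, pvInsertBy_append_not _ _ _ _ hskip,
            pvInsertBy_grouped k x C g hCt (fun c' hc' => hg c' (by simp [hc']))
              (fun hnm => hfresh (by simp [hne]; exact fun h => hnm h))]
        have hmem : (k x ∈ c :: C) ↔ (k x ∈ C) := by simp [hne]
        by_cases hm : k x ∈ C
        · simp [hm, hne, List.flatMap_cons, Ne.symm hne]
        · have : ¬ (c < k x) := by omega
          simp [hm, hne, PySem.List.insertBy, this, List.flatMap_cons, Ne.symm hne]
      · -- k x = c : x lands at the end of group c
        have hskip : ∀ y ∈ g c, (fun a b => decide (k b < k a)) x y = false := by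
          intro y hy; have := hg c (by simp) y hy; simp [this, heq]
        have hall : ∀ y ∈ C.flatMap g, (fun a b => decide (k b < k a)) x y = true := by
          intro y hy
          rcases List.mem_flatMap.mp hy with ⟨c', hc', hy'⟩
          have := hg c' (by simp [hc']) y hy'
          have := hCh c' hc'
          simp [hg c' (by simp [hc']) y hy']; omega
        rw [List.flatMap_cons, pvInsertBy_append_not _ _ _ _ hskip, pvInsertBy_all _ _ _ hall]
        have hmem : k x ∈ c :: C := by simp [heq]
        rw [if_pos hmem, List.flatMap_cons]
        have : ∀ c' ∈ C, (if c' = k x then g c' ++ [x] else g c') = g c' := by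
          intro c' hc'; have := hCh c' hc'; rw [if_neg (by omega)]
        rw [if_pos heq.symm, List.flatMap_congr this]
        simp
      · -- k x > c : x opens a fresh leading group
        have hne : k x ≠ c := by omega
        have hnm : k x ∉ c :: C := by
          simp
          constructor
          · omega
          · intro h; have := hCh _ h; omega
        have hall : ∀ y ∈ (c :: C).flatMap g, (fun a b => decide (k b < k a)) x y = true := by
          intro y hy
          rcases List.mem_flatMap.mp hy with ⟨c', hc', hy'⟩
          have hk : k y = c' := hg c' hc' y hy'
          have : c' ≤ c := by
            rcases List.mem_cons.mp hc' with h | h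
            · omega
            · have := hCh _ h; omega
          simp [hk]; omega
        rw [pvInsertBy_all _ _ _ hall, if_neg hnm]
        have hins : PySem.List.insertBy (fun a b => decide (b < a)) (k x) (c :: C) = k x :: c :: C := by
          simp [PySem.List.insertBy, hgt]
        rw [hins]
        conv_rhs => rw [List.flatMap_cons]
        have hx : (if k x = k x then g (k x) ++ [x] else g (k x)) = [x] := by
          rw [if_pos rfl, hfresh hnm]; simp
        rw [hx]
        have : ∀ c' ∈ c :: C, (if c' = k x then g c' ++ [x] else g c') = g c' := by
          intro c' hc'
          have : c' ≤ c := by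
            rcases List.mem_cons.mp hc' with h | h
            · omega
            · have := hCh _ h; omega
          rw [if_neg (by omega)]
        rw [List.flatMap_congr this]
        simp

theorem pvPairwise_gt_of_nodup (l : List Int)
    (h1 : l.Pairwise (fun a b => b ≤ a)) (h2 : l.Nodup) : l.Pairwise (· > ·) :=
  (h1.and h2).imp (fun h => lt_of_le_of_ne h.1 (Ne.symm h.2))

theorem pvSorted_rev_grouped (k : String × Int → Int) (xs : List (String × Int)) :
    PySem.List.sorted xs k true =
      (PySem.List.sorted (PySem.Set.ofList (xs.map k)) (fun c => c) true).flatMap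
        (fun c => xs.filter (fun p => k p == c)) := by
  induction xs using List.reverseRecOn with
  | nil => simp [PySem.List.sorted_rev_eq_foldl_insertBy, PySem.Set.ofList, PySem.Set.empty]
  | append_singleton xs x ih =>
      have hC : (PySem.List.sorted (PySem.Set.ofList (xs.map k)) (fun c => c) true).Pairwise (· > ·) := by
        apply pvPairwise_gt_of_nodup
        · exact PySem.List.sorted_pairwise_rev _ _
        · exact ((PySem.List.sorted_perm _ _ _).nodup_iff).mpr (PySem.Set.nodup_ofList _)
      have hmemC : ∀ c, c ∈ PySem.List.sorted (PySem.Set.ofList (xs.map k)) (fun c => c) true ↔ c ∈ xs.map k := by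
        intro c
        rw [PySem.List.mem_sorted, PySem.Set.mem_ofList]
      have hg : ∀ c ∈ PySem.List.sorted (PySem.Set.ofList (xs.map k)) (fun c => c) true,
          ∀ y ∈ xs.filter (fun p => k p == c), k y = c := by
        intro c _ y hy
        simpa using (List.mem_filter.mp hy).2
      have hfresh : k x ∉ PySem.List.sorted (PySem.Set.ofList (xs.map k)) (fun c => c) true →
          xs.filter (fun p => k p == k x) = [] := by
        intro h
        rw [hmemC] at h
        rw [List.filter_eq_nil_iff]
        intro p hp hkp
        exact h (List.mem_map.mpr ⟨p, hp, by simpa using hkp⟩)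
      have hstep : PySem.List.sorted (xs ++ [x]) k true
          = PySem.List.insertBy (fun a b => decide (k b < k a)) x (PySem.List.sorted xs k true) := by
        rw [PySem.List.sorted_rev_eq_foldl_insertBy, PySem.List.sorted_rev_eq_foldl_insertBy,
            List.foldl_append]
        simp
      rw [hstep, ih, pvInsertBy_grouped k x _ _ hC hg hfresh]
      have hset : PySem.Set.ofList ((xs ++ [x]).map k)
          = PySem.Set.add (PySem.Set.ofList (xs.map k)) (k x) := by
        simp [PySem.Set.ofList, List.foldl_append]
      by_cases hm : k x ∈ xs.map k
      · have hcont : (PySem.Set.ofList (xs.map k)).contains (k x) = true := by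
          exact (PySem.Set.contains_iff _ _).mpr ((PySem.Set.mem_ofList _ _).mpr hm)
        have : PySem.Set.ofList ((xs ++ [x]).map k) = PySem.Set.ofList (xs.map k) := by
          rw [hset]; simp only [PySem.Set.add, hcont, if_true]
        rw [this, if_pos ((hmemC _).mpr hm)]
        apply List.flatMap_congr
        intro c _
        by_cases hc : c = k x
        · subst hc; simp [List.filter_append]
        · simp [List.filter_append, hc, Ne.symm hc]
      · have hcont : (PySem.Set.ofList (xs.map k)).contains (k x) = false := by
          rw [Bool.eq_false_iff, Ne, PySem.Set.contains_iff]
          exact fun h => hm ((PySem.Set.mem_ofList _ _).mp h)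
        have hC' : PySem.Set.ofList ((xs ++ [x]).map k) = PySem.Set.ofList (xs.map k) ++ [k x] := by
          rw [hset]; simp only [PySem.Set.add, hcont, Bool.false_eq_true, if_false]
        have hsortC' : PySem.List.sorted (PySem.Set.ofList ((xs ++ [x]).map k)) (fun c => c) true
            = PySem.List.insertBy (fun a b => decide (b < a)) (k x)
                (PySem.List.sorted (PySem.Set.ofList (xs.map k)) (fun c => c) true) := by
          rw [hC', PySem.List.sorted_rev_eq_foldl_insertBy, PySem.List.sorted_rev_eq_foldl_insertBy,
              List.foldl_append]
          simp
        rw [hsortC', if_neg (fun h => hm ((hmemC _).mp h))]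
        apply List.flatMap_congr
        intro c _
        by_cases hc : c = k x
        · subst hc; simp [List.filter_append]
        · simp [List.filter_append, hc, Ne.symm hc]

theorem pv_main (in_dict : List (String × Int)) :
    print_double_sorted_list in_dict = print_double_sorted_list_alt in_dict := by
  unfold print_double_sorted_list print_double_sorted_list_alt
  set xs := (PySem.Dict.ofList in_dict).items with hxs
  set k : String × Int → Int := fun p => p.2 with hk
  set s1 := PySem.List.sorted xs (fun kv => kv.1) false with hs1
  -- distinct tags
  have hnodup : (xs.map Prod.fst).Nodup := by
    have := PySem.Dict.nodup_keys_ofList in_dict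
    simpa [PySem.Dict.keys, hxs] using this
  have hs1perm : s1.Perm xs := PySem.List.sorted_perm _ _ _
  have hs1pw : s1.Pairwise (fun a b => a.1 < b.1) := by
    have h1 := PySem.List.sorted_pairwise xs (fun kv : String × Int => kv.1)
    have h2 : (s1.map Prod.fst).Nodup := ((hs1perm.map Prod.fst).nodup_iff).mpr hnodup
    rw [List.Nodup, List.pairwise_map] at h2
    exact (h1.and h2).imp fun h => lt_of_le_of_ne h.1 h.2
  -- B's groups dict
  set groups := xs.foldl (fun g p => g.modify p.2 [] (fun ts => ts ++ [p.1]))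
    (PySem.Dict.empty : PySem.Dict Int (List String)) with hgroups
  have hswap : groups = (xs.map (fun p => (p.2, p.1))).foldl
      (fun d q => d.modify q.1 [] (fun ts => ts ++ [q.2])) PySem.Dict.empty := by
    rw [List.foldl_map]
  have hgetD : ∀ c : Int, groups.getD c [] = (xs.filter (fun p => p.2 == c)).map Prod.fst := by
    intro c
    rw [hswap, PySem.Dict.getD_foldl_modify_append, PySem.Dict.getD_empty, List.filter_map,
        List.map_map]
    rfl
  have hkeys : groups.keys = PySem.Set.ofList (xs.map k) := by
    rw [hgroups, PySem.Dict.keys_foldl_modify_key xs (fun p => p.2) [] (fun _ p => fun ts => ts ++ [p.1]),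
        PySem.Dict.keys_empty, PySem.Set.update_nil_left]
  set C := PySem.List.sorted (PySem.Set.ofList (xs.map k)) (fun c => c) true with hC
  have hCpw : C.Pairwise (· > ·) :=
    pvPairwise_gt_of_nodup _ (PySem.List.sorted_pairwise_rev _ _)
      (((PySem.List.sorted_perm _ _ _).nodup_iff).mpr (PySem.Set.nodup_ofList _))
  -- A's double sort as C-indexed groups of s1
  have hpermC : C.Perm (PySem.Set.ofList (s1.map k)) := by
    have h1 : C.Perm (PySem.Set.ofList (xs.map k)) := PySem.List.sorted_perm _ _ _
    have h2 : (PySem.Set.ofList (xs.map k) : List Int).Perm (PySem.Set.ofList (s1.map k)) :=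
      (List.perm_ext_iff_of_nodup (PySem.Set.nodup_ofList _) (PySem.Set.nodup_ofList _)).mpr
        (fun a => by
          rw [PySem.Set.mem_ofList, PySem.Set.mem_ofList, (hs1perm.map k).mem_iff])
    exact h1.trans h2
  have hA : PySem.List.sorted s1 (fun kv => kv.2) true
      = C.flatMap (fun c => s1.filter (fun p => k p == c)) := by
    rw [pvSorted_rev_grouped k s1]
    congr 1
    exact PySem.List.sorted_rev_eq_of_perm_of_pairwise_gt _ _ _ hpermC hCpw
  have hgrp : ∀ c : Int, PySem.List.sorted (groups.getD c []) (fun t => t) false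
      = (s1.filter (fun p => k p == c)).map Prod.fst := by
    intro c
    rw [hgetD c]
    apply PySem.List.sorted_eq_of_perm_of_pairwise_lt
    · exact (hs1perm.filter _).map _
    · rw [List.pairwise_map]
      exact hs1pw.filter _
  dsimp only
  rw [hkeys, hA, List.foldl_flatMap]
  congr 1
  apply PySem.List.foldl_congr_mem
  intro acc c hc
  rw [hgrp c, List.foldl_map]
  apply PySem.List.foldl_congr_mem
  intro acc' p hp
  have hpc : p.2 = c := by simpa using (List.mem_filter.mp hp).2
  rw [hpc]

-- ===== VERDICT (by name: the statement is the Claim_ definition above) =====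
theorem print_double_sorted_list_spec : Claim_equal_print_double_sorted_list := by
  intro in_dict _
  unfold Spec_print_double_sorted_list
  exact pv_main in_dict
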